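-- pv_equiv track=rewrite | github.com/gabyross/CS50 | pset6/credit/credit.py | odd_digits
-- ===== SOURCE A (Python) =====
-- def add_digits(num):
--     sum = 0
--     while (num != 0):
--         last_digit = num % 10
--         num = (num // 10)
--         sum += last_digit
--     return sum
--
-- def odd_digits(num):
--     odds_sum = 0
--     # elimino el ultimo digito para empezar con el penultimo
--     num = num // 10
--     while (num != 0):
--         # obtengo el penultimo digito
--         odd_num = num % 10
--         # asumo que es impar y lo multiplico por dos
--         mul = odd_num * 2
--         # sumo los digitos impares
--         odds_sum += add_digits(mul)
--         # divido entrre 100 para actualizar el numero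
--         num = num // 100
--     return odds_sum
-- ===== SOURCE B (Python) =====
-- def odd_digits(num):
--     total = 0
--     pos = 0
--     while num != 0:
--         if pos % 2 == 1:
--             d2 = (num % 10) * 2
--             total += d2 // 10 + d2 % 10
--         num //= 10
--         pos += 1
--     return total
-- ===== Notes on version B (the rewrite author's own statement) =====
-- stated objective: simpler
-- what changed: One while-loop peels every digit with a position counter and sums the digit-sum of doubled odd-position digits inline as d2//10 + d2%10 (valid since d2 <= 18), eliminating the add_digits helper loop and the //100 stride.
import Mathlib
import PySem

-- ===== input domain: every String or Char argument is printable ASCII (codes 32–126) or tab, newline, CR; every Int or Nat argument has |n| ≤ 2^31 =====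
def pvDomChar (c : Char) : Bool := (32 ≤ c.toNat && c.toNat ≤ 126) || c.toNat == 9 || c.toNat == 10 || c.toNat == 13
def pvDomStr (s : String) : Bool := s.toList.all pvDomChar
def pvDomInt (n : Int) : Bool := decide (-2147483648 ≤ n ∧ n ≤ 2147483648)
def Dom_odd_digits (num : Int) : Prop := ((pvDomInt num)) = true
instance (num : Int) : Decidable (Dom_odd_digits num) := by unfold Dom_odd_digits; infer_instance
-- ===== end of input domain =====

-- B replaces A's //100 stride plus add_digits helper by one digit-peeling loop with a
-- position counter and an inline digit-sum d2//10 + d2%10 (objective: simpler).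


-- ===== PORT A =====
-- while (num != 0): sum += num % 10; num //= 10   — Python diverges for num < 0,
-- so the guard 'num ≤ 0' only makes the port total outside Pre_ (it agrees on num ≥ 0).
def addDigitsLoop (num sum : Int) : Int :=
  if h : num ≤ 0 then sum
  else addDigitsLoop (PySem.Int.floordiv num 10) (sum + PySem.Int.mod num 10)
termination_by num.toNat
decreasing_by
  have h10 : PySem.Int.floordiv num 10 = num / 10 :=
    PySem.Int.floordiv_eq_ediv_of_pos (by omega)
  rw [h10]; omega

def add_digits (num : Int) : Int := addDigitsLoop num 0

-- while (num != 0): odds_sum += add_digits((num % 10) * 2); num //= 100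
def oddLoop (num odds_sum : Int) : Int :=
  if h : num ≤ 0 then odds_sum
  else oddLoop (PySem.Int.floordiv num 100)
        (odds_sum + add_digits (PySem.Int.mod num 10 * 2))
termination_by num.toNat
decreasing_by
  have h100 : PySem.Int.floordiv num 100 = num / 100 :=
    PySem.Int.floordiv_eq_ediv_of_pos (by omega)
  rw [h100]; omega

def odd_digits (num : Int) : Int := oddLoop (PySem.Int.floordiv num 10) 0

-- ===== PORT B =====
-- single while-loop peeling every digit, position counter, inline digit-sum
def bLoop (num : Int) (pos : Nat) (total : Int) : Int :=
  if h : num ≤ 0 then total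
  else
    let total' :=
      if pos % 2 = 1 then
        let d2 := PySem.Int.mod num 10 * 2
        total + (PySem.Int.floordiv d2 10 + PySem.Int.mod d2 10)
      else total
    bLoop (PySem.Int.floordiv num 10) (pos + 1) total'
termination_by num.toNat
decreasing_by
  have h10 : PySem.Int.floordiv num 10 = num / 10 :=
    PySem.Int.floordiv_eq_ediv_of_pos (by omega)
  rw [h10]; omega

def odd_digits_alt (num : Int) : Int := bLoop num 0 0

-- ===== PRECONDITION & SPEC =====
-- Pre_ excludes num < 0, on which the Python A (and B) loop forever (num //= 10 never reaches 0).
def Pre_odd_digits (num : Int) : Prop := 0 ≤ num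
instance (num : Int) : Decidable (Pre_odd_digits num) := by unfold Pre_odd_digits; infer_instance
def pvWitness_odd_digits : Int := 616

def Spec_odd_digits (num : Int) (out : Int) : Prop := out = odd_digits_alt num
instance (num : Int) (out : Int) : Decidable (Spec_odd_digits num out) := by unfold Spec_odd_digits; infer_instance

-- ===== CLAIM (what is proved, stated in full; the proofs are below) =====
def Claim_equal_odd_digits : Prop := ∀ (num : Int), Dom_odd_digits num → Pre_odd_digits num → Spec_odd_digits num (odd_digits num)

-- ===== LEMMAS AND PROOFS =====

-- the inline digit-sum equals add_digits on a doubled single digit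
theorem addLoop_zero (s : Int) : addDigitsLoop 0 s = s := by
  rw [addDigitsLoop]; simp

theorem addLoop_step (m s : Int) (h : 0 < m) :
    addDigitsLoop m s = addDigitsLoop (m / 10) (s + m % 10) := by
  rw [addDigitsLoop, dif_neg (by omega : ¬ m ≤ 0),
    PySem.Int.floordiv_eq_ediv_of_pos (by norm_num : (0:Int) < 10),
    PySem.Int.mod_eq_emod_of_pos (by norm_num : (0:Int) < 10)]

theorem addDigits_small (d : Int) (h0 : 0 ≤ d) (h9 : d < 10) :
    add_digits (d * 2) = PySem.Int.floordiv (d * 2) 10 + PySem.Int.mod (d * 2) 10 := by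
  rw [PySem.Int.floordiv_eq_ediv_of_pos (by norm_num : (0:Int) < 10),
    PySem.Int.mod_eq_emod_of_pos (by norm_num : (0:Int) < 10)]
  unfold add_digits
  by_cases hd0 : d = 0
  · subst hd0; norm_num [addLoop_zero]
  · have h1 : 0 < d * 2 := by omega
    rw [addLoop_step _ _ h1]
    by_cases h5 : d < 5
    · have hq : d * 2 / 10 = 0 := by omega
      rw [hq, addLoop_zero]
    · have hq : d * 2 / 10 = 1 := by omega
      have h110 : (1:Int) / 10 = 0 := by norm_num
      rw [hq, addLoop_step _ _ one_pos, h110, addLoop_zero]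
      omega

theorem mod10_bounds (num : Int) : 0 ≤ PySem.Int.mod num 10 ∧ PySem.Int.mod num 10 < 10 := by
  have h := Int.emod_nonneg num (by norm_num : (10:Int) ≠ 0)
  have h2 := Int.emod_lt_of_pos num (by norm_num : (0:Int) < 10)
  have he : PySem.Int.mod num 10 = num % 10 := PySem.Int.mod_eq_emod_of_pos (by norm_num)
  omega

theorem oddLoop_zero (acc : Int) : oddLoop 0 acc = acc := by
  rw [oddLoop]; simp

-- main invariant: bLoop at even position is oddLoop on num/10; at odd position, oddLoop on num
theorem bLoop_oddLoop (n : Nat) :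
    ∀ (num : Int) (pos : Nat) (acc : Int), 0 ≤ num → num.toNat = n →
      bLoop num pos acc =
        if pos % 2 = 1 then oddLoop num acc
        else oddLoop (PySem.Int.floordiv num 10) acc := by
  induction n using Nat.strong_induction_on with
  | _ n ih =>
    intro num pos acc hnn hto
    by_cases hz : num ≤ 0
    · have : num = 0 := le_antisymm hz hnn
      subst this
      have hf : PySem.Int.floordiv (0:Int) 10 = 0 := by
        norm_num [PySem.Int.floordiv, Int.fdiv]
      rw [bLoop, hf]
      simp [oddLoop_zero]
    · have hpos : (0:Int) < num := by omega
      have h10 : PySem.Int.floordiv num 10 = num / 10 :=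
        PySem.Int.floordiv_eq_ediv_of_pos (by omega)
      have hdec : (num / 10).toNat < n := by omega
      have hnn10 : 0 ≤ num / 10 := by positivity
      rw [bLoop]
      simp only [dif_neg (by omega : ¬ num ≤ 0), h10]
      rw [ih (num / 10).toNat hdec (num / 10) (pos + 1) _ hnn10 rfl]
      by_cases hp : pos % 2 = 1
      · -- odd position: B contributes this digit; A's oddLoop consumes num%10 and strides //100
        simp only [if_pos hp, if_neg (by omega : ¬ (pos + 1) % 2 = 1)]
        conv_rhs => rw [oddLoop]
        simp only [dif_neg (by omega : ¬ num ≤ 0)]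
        obtain ⟨hd0, hd9⟩ := mod10_bounds num
        have h100 : PySem.Int.floordiv num 100 = num / 100 :=
          PySem.Int.floordiv_eq_ediv_of_pos (by norm_num)
        have h10' : PySem.Int.floordiv (num / 10) 10 = num / 10 / 10 :=
          PySem.Int.floordiv_eq_ediv_of_pos (by norm_num)
        have hdd : num / 10 / 10 = num / 100 := by omega
        rw [addDigits_small _ hd0 hd9, h100, h10', hdd]
      · -- even position: B skips this digit; both sides continue from num/10
        simp only [if_neg hp, if_pos (by omega : (pos + 1) % 2 = 1)]

-- ===== VERDICT (by name: the statement is the Claim_ definition above) =====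
theorem odd_digits_spec : Claim_equal_odd_digits := by
  intro num _ hpre
  unfold Spec_odd_digits odd_digits odd_digits_alt
  rw [bLoop_oddLoop num.toNat num 0 0 hpre rfl]
  simp
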